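-- pv_equiv track=rewrite | github.com/suminhan123/coding-test | programmers/lv2/구명 보트/구명보트.py | contain_arr
-- ===== SOURCE A (Python) =====
-- def contain_arr (arr, target):
--   test = arr[:]
--   for t in target:
--     if t in test:
--       test.remove(t)
--     else:
--       return False
--   return True
-- ===== SOURCE B (Python) =====
-- def contain_arr(arr, target):
--     seen = []
--     for v in target:
--         if v in seen:
--             continue
--         seen.append(v)
--         if target.count(v) > arr.count(v):
--             return False
--     return True
-- ===== Notes on version B (the rewrite author's own statement) =====
-- stated objective: alternative
-- what changed: Replaces A's greedy consume-a-mutable-copy loop (copy arr, remove each matched target element) with a per-distinct-value count comparison: target.count(v) <= arr.count(v) for each distinct v of target; nothing is copied or mutated.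
import Mathlib
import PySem

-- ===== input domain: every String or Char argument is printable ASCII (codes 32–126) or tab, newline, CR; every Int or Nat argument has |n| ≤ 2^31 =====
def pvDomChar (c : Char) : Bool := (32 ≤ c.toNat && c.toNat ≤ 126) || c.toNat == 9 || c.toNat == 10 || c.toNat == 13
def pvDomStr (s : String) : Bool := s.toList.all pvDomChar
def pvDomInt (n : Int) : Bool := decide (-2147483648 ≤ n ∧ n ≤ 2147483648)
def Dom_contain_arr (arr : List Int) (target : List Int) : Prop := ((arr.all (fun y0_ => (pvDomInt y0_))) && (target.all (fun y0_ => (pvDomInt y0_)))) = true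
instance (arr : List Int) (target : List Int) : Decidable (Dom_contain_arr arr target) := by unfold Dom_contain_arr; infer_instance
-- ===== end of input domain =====

-- B replaces A's greedy consume-a-mutable-copy loop with a per-distinct-value count comparison (objective: alternative).

-- ===== PORT A =====
-- A's loop: working copy `test`; for each t of target, if t ∈ test remove its first occurrence, else return False.
def containArrLoopA : List Int → List Int → Bool
  | _, [] => true
  | test, t :: ts => if test.contains t then containArrLoopA (test.erase t) ts else false

def contain_arr (arr : List Int) (target : List Int) : Bool :=
  containArrLoopA arr target

-- ===== PORT B =====
-- B's loop: `seen` accumulates distinct values already checked; for a new v compare target.count v with arr.count v.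
def containArrLoopB (arr target : List Int) : List Int → List Int → Bool
  | _, [] => true
  | seen, v :: vs =>
      if seen.contains v then containArrLoopB arr target seen vs
      else if target.count v > arr.count v then false
      else containArrLoopB arr target (seen ++ [v]) vs

def contain_arr_alt (arr : List Int) (target : List Int) : Bool :=
  containArrLoopB arr target [] target

-- ===== PRECONDITION & SPEC =====
def Spec_contain_arr (arr : List Int) (target : List Int) (out : Bool) : Prop := out = contain_arr_alt arr target
instance (arr : List Int) (target : List Int) (out : Bool) : Decidable (Spec_contain_arr arr target out) := by unfold Spec_contain_arr; infer_instance

-- ===== CLAIM (what is proved, stated in full; the proofs are below) =====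
def Claim_equal_contain_arr : Prop := ∀ (arr : List Int) (target : List Int), Dom_contain_arr arr target → Spec_contain_arr arr target (contain_arr arr target)

-- ===== LEMMAS AND PROOFS =====

theorem loopA_step (test : List Int) (t : Int) (ts : List Int) :
    containArrLoopA test (t :: ts) =
      if test.contains t then containArrLoopA (test.erase t) ts else false := rfl

theorem loopA_true_iff (ts : List Int) : ∀ test : List Int,
    (containArrLoopA test ts = true ↔ ∀ v : Int, ts.count v ≤ test.count v) := by
  induction ts with
  | nil =>
      intro test
      simp [containArrLoopA]
  | cons t ts ih =>
      intro test
      by_cases h : t ∈ test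
      · have hb : test.contains t = true := by simpa using h
        rw [loopA_step, hb, if_pos rfl, ih]
        have hpos : 1 ≤ test.count t := List.one_le_count_iff.mpr h
        constructor
        · intro H v
          have hH := H v
          by_cases hv : v = t
          · subst hv
            have hc : (test.erase v).count v = test.count v - 1 := List.count_erase_self
            have hcc : List.count v (v :: ts) = List.count v ts + 1 := by
              simp
            omega
          · have hc : (test.erase t).count v = test.count v := List.count_erase_of_ne hv
            have hcc : List.count v (t :: ts) = List.count v ts := by
              simp [List.count_cons]
              exact fun h2 => hv h2.symm
            omega
        · intro H v
          have hH := H v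
          have hHt := H t
          by_cases hv : v = t
          · subst hv
            have hc : (test.erase v).count v = test.count v - 1 := List.count_erase_self
            have hcc : List.count v (v :: ts) = List.count v ts + 1 := by
              simp
            omega
          · have hc : (test.erase t).count v = test.count v := List.count_erase_of_ne hv
            have hcc : List.count v (t :: ts) = List.count v ts := by
              simp [List.count_cons]
              exact fun h2 => hv h2.symm
            omega
      · have hb : test.contains t = false := by simpa using h
        rw [loopA_step, hb, if_neg Bool.false_ne_true]
        have hz : test.count t = 0 := List.count_eq_zero.mpr h
        have hcc : List.count t (t :: ts) = List.count t ts + 1 := by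
          simp
        simp only [Bool.false_eq_true, false_iff, not_forall, not_le]
        exact ⟨t, by omega⟩

theorem loopB_step (arr target seen : List Int) (v : Int) (vs : List Int) :
    containArrLoopB arr target seen (v :: vs) =
      if seen.contains v then containArrLoopB arr target seen vs
      else if target.count v > arr.count v then false
      else containArrLoopB arr target (seen ++ [v]) vs := rfl

theorem loopB_true_iff (arr target : List Int) (vs : List Int) : ∀ seen : List Int,
    (containArrLoopB arr target seen vs = true ↔
      ∀ v ∈ vs, v ∉ seen → target.count v ≤ arr.count v) := by
  induction vs with
  | nil =>
      intro seen
      simp [containArrLoopB]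
  | cons v vs ih =>
      intro seen
      by_cases hm : v ∈ seen
      · have hs : seen.contains v = true := by simpa using hm
        rw [loopB_step, hs, if_pos rfl, ih]
        constructor
        · intro H w hw hns
          rcases List.mem_cons.mp hw with rfl | hw'
          · exact absurd hm hns
          · exact H w hw' hns
        · intro H w hw hns
          exact H w (List.mem_cons_of_mem _ hw) hns
      · have hs : seen.contains v = false := by simpa using hm
        by_cases hc : target.count v > arr.count v
        · rw [loopB_step, hs, if_neg Bool.false_ne_true, if_pos hc]
          simp only [Bool.false_eq_true, false_iff, not_forall]
          exact ⟨v, List.mem_cons_self, hm, by omega⟩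
        · have hle : target.count v ≤ arr.count v := by omega
          rw [loopB_step, hs, if_neg Bool.false_ne_true, if_neg hc, ih]
          constructor
          · intro H w hw hns
            rcases List.mem_cons.mp hw with rfl | hw'
            · exact hle
            · by_cases hwv : w = v
              · subst hwv; exact hle
              · exact H w hw' (by simp [hns, hwv])
          · intro H w hw hns
            have hns' : w ∉ seen := fun hws => hns (by simp [hws])
            exact H w (List.mem_cons_of_mem _ hw) hns'

theorem contain_arr_eq (arr target : List Int) :
    contain_arr arr target = contain_arr_alt arr target := by
  have hA := loopA_true_iff target arr
  have hB := loopB_true_iff arr target target []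
  have : contain_arr arr target = true ↔ contain_arr_alt arr target = true := by
    unfold contain_arr contain_arr_alt
    rw [hA, hB]
    constructor
    · intro H v _ _; exact H v
    · intro H v
      by_cases hv : v ∈ target
      · exact H v hv (by simp)
      · have : target.count v = 0 := List.count_eq_zero.mpr hv
        omega
  exact Bool.eq_iff_iff.mpr this

-- ===== VERDICT (by name: the statement is the Claim_ definition above) =====
theorem contain_arr_spec : Claim_equal_contain_arr := by
  intro arr target _
  exact contain_arr_eq arr target
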